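-- pv_equiv track=rewrite | github.com/Umme334/3rd-AI-BOOK | backend/src/services/validation_service.py | sanitize_text_input
-- ===== SOURCE A (Python) =====
-- def sanitize_text_input(text: str) -> str:
--     """
--     Sanitize text input to prevent security issues.
--
--     Args:
--         text: Text to sanitize
--
--     Returns:
--         Sanitized text
--     """
--     if not text:
--         return text
--
--     # Remove potential script tags
--     sanitized = text.replace('<script', '&lt;script').replace('</script>', '&lt;/script&gt;')
--
--     # Remove other potentially harmful tags (basic implementation)
--     harmful_tags = ['<iframe', '<object', '<embed', '<form']
--     for tag in harmful_tags:
--         sanitized = sanitized.replace(tag, f'&lt;{tag[1:]}')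
--
--     return sanitized.strip()
-- ===== SOURCE B (Python) =====
-- # Single left-to-right scan over the text with a pattern table, instead of six
-- # separate full-string .replace passes. Same result; the replacements contain
-- # no '<' so the passes cannot interact.
-- _PATS = [
--     ('</script>', '&lt;/script&gt;'),
--     ('<script', '&lt;script'),
--     ('<iframe', '&lt;iframe'),
--     ('<object', '&lt;object'),
--     ('<embed', '&lt;embed'),
--     ('<form', '&lt;form'),
-- ]
--
--
-- def sanitize_text_input(text: str) -> str:
--     if not text:
--         return text
--     out = []
--     i, n = 0, len(text)
--     while i < n:
--         c = text[i]
--         if c == '<':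
--             for pat, rep in _PATS:
--                 if text.startswith(pat, i):
--                     out.append(rep)
--                     i += len(pat)
--                     break
--             else:
--                 out.append(c)
--                 i += 1
--         else:
--             out.append(c)
--             i += 1
--     return ''.join(out).strip()
-- ===== Notes on version B (the rewrite author's own statement) =====
-- stated objective: alternative
-- what changed: Replaces the six sequential full-string .replace passes by one left-to-right scan driven by a pattern table (each position is examined once; matched patterns are emitted escaped, everything else copied).
import Mathlib
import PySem

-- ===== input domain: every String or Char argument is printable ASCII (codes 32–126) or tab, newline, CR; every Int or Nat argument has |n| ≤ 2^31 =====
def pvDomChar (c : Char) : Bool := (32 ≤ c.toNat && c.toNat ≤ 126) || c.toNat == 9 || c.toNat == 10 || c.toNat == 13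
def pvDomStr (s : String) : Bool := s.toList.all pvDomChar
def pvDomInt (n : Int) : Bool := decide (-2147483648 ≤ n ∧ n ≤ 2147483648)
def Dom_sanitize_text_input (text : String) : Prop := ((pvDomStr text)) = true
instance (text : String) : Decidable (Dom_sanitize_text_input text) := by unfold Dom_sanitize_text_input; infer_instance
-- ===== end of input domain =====

-- B replaces A's six sequential full-string .replace passes by one left-to-right
-- table-driven scan (alternative algorithm, proved to give the same result).

set_option maxRecDepth 8000


-- ===== PORT A =====
-- literal transliteration: two chained .replace calls, then a loop of .replace
-- over the harmful-tag list (f'&lt;{tag[1:]}' ported via ++ and slice), then .strip()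
def sanitize_text_input (text : String) : String :=
  if text = "" then text
  else
    let sanitized := PySem.Str.replace (PySem.Str.replace text "<script" "&lt;script")
                       "</script>" "&lt;/script&gt;"
    let sanitized := (["<iframe", "<object", "<embed", "<form"] : List String).foldl
      (fun acc tag => PySem.Str.replace acc tag ("&lt;" ++ PySem.Str.slice tag (some 1) none))
      sanitized
    PySem.Str.strip sanitized

-- ===== PORT B =====
-- B's pattern table, in B's order ('</script>' first)
def pvPats : List (List Char × List Char) :=
  [("</script>".toList, "&lt;/script&gt;".toList),
   ("<script".toList,   "&lt;script".toList),
   ("<iframe".toList,   "&lt;iframe".toList),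
   ("<object".toList,   "&lt;object".toList),
   ("<embed".toList,    "&lt;embed".toList),
   ("<form".toList,     "&lt;form".toList)]

-- the inner `for pat, rep in _PATS: if text.startswith(pat, i)` loop
def pvMatch : List (List Char × List Char) → List Char → Option (List Char × Nat)
  | [], _ => none
  | (pat, rep) :: rest, s => if pat.isPrefixOf s then some (rep, pat.length) else pvMatch rest s

-- B's while loop over the text, one position at a time
def pvScan : List Char → List Char
  | [] => []
  | c :: rest =>
    if c = '<' then
      match pvMatch pvPats (c :: rest) with
      | some (rep, k) => rep ++ pvScan (rest.drop (k - 1))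
      | none => c :: pvScan rest
    else c :: pvScan rest
termination_by s => s.length
decreasing_by
  all_goals simp only [List.length_drop, List.length_cons]
  all_goals omega

def sanitize_text_input_alt (text : String) : String :=
  if text = "" then text
  else PySem.Str.strip (String.ofList (pvScan text.toList))

-- ===== PRECONDITION & SPEC =====
def Spec_sanitize_text_input (text : String) (out : String) : Prop := out = sanitize_text_input_alt text
instance (text : String) (out : String) : Decidable (Spec_sanitize_text_input text out) := by unfold Spec_sanitize_text_input; infer_instance

-- ===== CLAIM (what is proved, stated in full; the proofs are below) =====
def Claim_equal_sanitize_text_input : Prop := ∀ (text : String), Dom_sanitize_text_input text → Spec_sanitize_text_input text (sanitize_text_input text)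

-- ===== LEMMAS AND PROOFS =====

-- the six patterns and replacements, in A's application order
def pvP1 : List Char := "<script".toList
def pvE1 : List Char := "&lt;script".toList
def pvP2 : List Char := "</script>".toList
def pvE2 : List Char := "&lt;/script&gt;".toList
def pvP3 : List Char := "<iframe".toList
def pvE3 : List Char := "&lt;iframe".toList
def pvP4 : List Char := "<object".toList
def pvE4 : List Char := "&lt;object".toList
def pvP5 : List Char := "<embed".toList
def pvE5 : List Char := "&lt;embed".toList
def pvP6 : List Char := "<form".toList
def pvE6 : List Char := "&lt;form".toList

-- A's chain of replaces, at the List Char level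
def pvChain (s : List Char) : List Char :=
  PySem.Chars.replace (PySem.Chars.replace (PySem.Chars.replace (PySem.Chars.replace
    (PySem.Chars.replace (PySem.Chars.replace s pvP1 pvE1) pvP2 pvE2) pvP3 pvE3)
      pvP4 pvE4) pvP5 pvE5) pvP6 pvE6

-- ---- basic equations for PySem.Chars.replace (old ≠ []) ----

theorem pv_go_succ (old new : List Char) (fuel : Nat) (c : Char) (t acc : List Char) :
    PySem.Chars.replace.go old new (fuel+1) (c::t) acc =
      if old.isPrefixOf (c::t) then
        PySem.Chars.replace.go old new fuel ((c::t).drop old.length) (new.reverse ++ acc)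
      else PySem.Chars.replace.go old new fuel t (c::acc) := rfl

theorem pv_go_nil (old new : List Char) (fuel : Nat) (acc : List Char) :
    PySem.Chars.replace.go old new fuel [] acc = acc.reverse := by
  cases fuel <;> simp [PySem.Chars.replace.go]

theorem pv_go_acc (old new : List Char) :
    ∀ (fuel : Nat) (l acc : List Char),
      PySem.Chars.replace.go old new fuel l acc =
        acc.reverse ++ PySem.Chars.replace.go old new fuel l [] := by
  intro fuel
  induction fuel with
  | zero => intro l acc; simp [PySem.Chars.replace.go]
  | succ n ih =>
    intro l acc
    cases l with
    | nil => simp [pv_go_nil]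
    | cons c t =>
      rw [pv_go_succ, pv_go_succ]
      split
      · rw [ih _ (new.reverse ++ acc), ih _ (new.reverse ++ [])]; simp
      · rw [ih _ (c :: acc), ih _ [c]]; simp

theorem pv_go_fuel (old new : List Char) (hold : old ≠ []) :
    ∀ (fuel : Nat) (l acc : List Char), l.length ≤ fuel →
      PySem.Chars.replace.go old new fuel l acc =
        PySem.Chars.replace.go old new l.length l acc := by
  intro fuel
  induction fuel using Nat.strong_induction_on with
  | _ fuel ih =>
    intro l acc hlen
    match fuel, l with
    | 0, l =>
      have : l = [] := List.eq_nil_of_length_eq_zero (Nat.le_zero.mp hlen)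
      subst this; rfl
    | n+1, [] => simp [pv_go_nil]
    | n+1, c :: t =>
      have hone : 1 ≤ old.length := by
        cases old with
        | nil => exact absurd rfl hold
        | cons _ _ => simp
      have hlt : t.length ≤ n := by simpa using hlen
      rw [pv_go_succ]
      have hcons : (c :: t).length = t.length + 1 := rfl
      rw [hcons, pv_go_succ]
      split
      · have hlen2 : ((c :: t).drop old.length).length ≤ n := by
          simp only [List.length_drop, List.length_cons]; omega
        have hlen3 : ((c :: t).drop old.length).length ≤ t.length := by
          simp only [List.length_drop, List.length_cons]; omega
        rw [ih n (by omega) _ _ hlen2, ih t.length (by omega) _ _ hlen3]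
      · rw [ih n (by omega) t _ hlt]

theorem pv_replace_nil (old new : List Char) (hold : old ≠ []) :
    PySem.Chars.replace [] old new = [] := by
  simp [PySem.Chars.replace, List.isEmpty_iff, hold, PySem.Chars.replace.go]

theorem pv_replace_cons_neg (old new : List Char) (c : Char) (t : List Char)
    (h : ¬ old <+: (c :: t)) :
    PySem.Chars.replace (c :: t) old new = c :: PySem.Chars.replace t old new := by
  have hold : old ≠ [] := by
    intro he; subst he; exact h (List.nil_prefix)
  simp only [PySem.Chars.replace, List.isEmpty_iff, hold, reduceIte]
  have hcons : (c :: t).length = t.length + 1 := rfl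
  rw [hcons, pv_go_succ]
  rw [if_neg (by simpa [List.isPrefixOf_iff_prefix] using h)]
  rw [pv_go_acc]
  rfl

theorem pv_replace_append_self (old new t : List Char) (hold : old ≠ []) :
    PySem.Chars.replace (old ++ t) old new = new ++ PySem.Chars.replace t old new := by
  obtain ⟨c, old', rfl⟩ : ∃ c old', old = c :: old' := by
    cases old with
    | nil => exact absurd rfl hold
    | cons c o => exact ⟨c, o, rfl⟩
  simp only [PySem.Chars.replace, List.isEmpty_iff, hold, reduceIte]
  have hcons : ((c :: old') ++ t) = c :: (old' ++ t) := rfl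
  have hlen : (c :: (old' ++ t)).length = (old' ++ t).length + 1 := rfl
  rw [hcons, hlen, pv_go_succ]
  rw [if_pos (by rw [List.isPrefixOf_iff_prefix]; exact ⟨t, rfl⟩)]
  have hdrop : (c :: (old' ++ t)).drop (c :: old').length = t := by
    have h : (c :: (old' ++ t)) = (c :: old') ++ t := rfl
    rw [h, List.drop_left]
  rw [hdrop]
  rw [pv_go_fuel _ _ hold _ _ _ (by simp), pv_go_acc]
  simp

-- a pattern starting with '<' skips over a block that contains no '<'
theorem pv_replace_append_no_lt (old new : List Char) (hh : old.head? = some '<')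
    (a : List Char) (ha : ∀ x ∈ a, x ≠ '<') (t : List Char) :
    PySem.Chars.replace (a ++ t) old new = a ++ PySem.Chars.replace t old new := by
  obtain ⟨o', rfl⟩ : ∃ o', old = '<' :: o' := by
    cases old with
    | nil => simp at hh
    | cons x o =>
      simp only [List.head?_cons, Option.some.injEq] at hh
      exact ⟨o, by rw [hh]⟩
  induction a with
  | nil => simp
  | cons c a' ih =>
    have hnp : ¬ ('<' :: o') <+: (c :: (a' ++ t)) := by
      intro hp
      rw [List.cons_prefix_cons] at hp
      exact ha c (by simp) hp.1.symm
    have h : (c :: a') ++ t = c :: (a' ++ t) := rfl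
    rw [h, pv_replace_cons_neg _ _ _ _ hnp, ih (fun x hx => ha x (by simp [hx]))]
    rfl

-- a mismatch at index k below both lengths kills prefixhood for every continuation
theorem pv_not_prefix_of_mismatch (old a : List Char) (k : Nat)
    (h1 : k < a.length) (h2 : k < old.length) (hne : a[k]? ≠ old[k]?) (u : List Char) :
    ¬ old <+: a ++ u := by
  rintro ⟨v, hv⟩
  have e1 : (a ++ u)[k]? = a[k]? := List.getElem?_append_left h1
  have e2 : (old ++ v)[k]? = old[k]? := List.getElem?_append_left h2
  apply hne
  rw [← e1, ← hv, e2]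

-- a full pattern block '<'::… is skipped by replace with a non-matching pattern
theorem pv_replace_append_pat (old new a : List Char) (hh : old.head? = some '<')
    (hha : a.head? = some '<') (hq : ∀ x ∈ a.tail, x ≠ '<')
    (t : List Char) (hnp : ¬ old <+: a ++ t) :
    PySem.Chars.replace (a ++ t) old new = a ++ PySem.Chars.replace t old new := by
  obtain ⟨a', rfl⟩ : ∃ a', a = '<' :: a' := by
    cases a with
    | nil => simp at hha
    | cons x a' =>
      simp only [List.head?_cons, Option.some.injEq] at hha
      exact ⟨a', by rw [hha]⟩
  have h : ('<' :: a') ++ t = '<' :: (a' ++ t) := rfl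
  rw [h] at hnp ⊢
  rw [pv_replace_cons_neg _ _ _ _ hnp, pv_replace_append_no_lt old new hh a' (by simpa using hq) t]
  rfl

-- replace (pattern '<'…, replacement '&'…) creates no new occurrence of an '&'-free word
theorem pv_not_prefix_replace (old new : List Char) (hold : old ≠ [])
    (hnew : new.head? = some '&') :
    ∀ (t q : List Char), (∀ x ∈ q, x ≠ '&') → ¬ q <+: t →
      ¬ q <+: PySem.Chars.replace t old new := by
  intro t
  induction t with
  | nil =>
    intro q hq hnot
    rw [pv_replace_nil _ _ hold]; exact hnot
  | cons c t' ih =>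
    intro q hq hnot
    by_cases hp : old <+: (c :: t')
    · obtain ⟨u, hu⟩ := hp
      rw [← hu, pv_replace_append_self _ _ _ hold]
      intro hpre
      cases q with
      | nil => exact hnot List.nil_prefix
      | cons x q' =>
        obtain ⟨n', rfl⟩ : ∃ n', new = '&' :: n' := by
          cases new with
          | nil => simp at hnew
          | cons y n =>
            simp only [List.head?_cons, Option.some.injEq] at hnew
            exact ⟨n, by rw [hnew]⟩
        have h : ('&' :: n') ++ PySem.Chars.replace u old ('&' :: n')
            = '&' :: (n' ++ PySem.Chars.replace u old ('&' :: n')) := rfl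
        rw [h, List.cons_prefix_cons] at hpre
        exact hq x (by simp) hpre.1
    · rw [pv_replace_cons_neg _ _ _ _ hp]
      intro hpre
      cases q with
      | nil => exact hnot List.nil_prefix
      | cons x q' =>
        rw [List.cons_prefix_cons] at hpre
        obtain ⟨rfl, hq'⟩ := hpre
        have hnot' : ¬ q' <+: t' := fun h => hnot (List.cons_prefix_cons.mpr ⟨rfl, h⟩)
        exact ih q' (fun y hy => hq y (by simp [hy])) hnot' hq'

-- bridge: a decidable Bool scan gives the ∀-membership fact (decide on the Bool is cheap)
theorem pv_ball_ne (l : List Char) (ch : Char) (h : l.all (fun x => x ≠ ch) = true) :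
    ∀ x ∈ l, x ≠ ch := by simpa [List.all_eq_true] using h

-- one-step equations for pvScan
theorem pvScan_nil : pvScan [] = [] := by rw [pvScan]

theorem pvScan_match (c : Char) (rest rep : List Char) (k : Nat)
    (hc : c = '<') (hm : pvMatch pvPats (c :: rest) = some (rep, k)) :
    pvScan (c :: rest) = rep ++ pvScan (rest.drop (k - 1)) := by
  rw [pvScan, if_pos hc, hm]

theorem pvScan_cons (c : Char) (rest : List Char)
    (h : c ≠ '<' ∨ pvMatch pvPats (c :: rest) = none) :
    pvScan (c :: rest) = c :: pvScan rest := by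
  rw [pvScan]
  rcases h with h | h
  · rw [if_neg h]
  · by_cases hc : c = '<'
    · rw [if_pos hc, h]
    · rw [if_neg hc]

-- the main equivalence at the List Char level
theorem pv_chain_eq_scan_aux : ∀ (n : Nat) (s : List Char), s.length ≤ n → pvChain s = pvScan s := by
  intro n
  induction n with
  | zero =>
    intro s hlen
    have : s = [] := List.eq_nil_of_length_eq_zero (Nat.le_zero.mp hlen)
    subst this
    show pvChain [] = pvScan []
    unfold pvChain
    rw [pv_replace_nil _ _ (by decide), pv_replace_nil _ _ (by decide),
        pv_replace_nil _ _ (by decide), pv_replace_nil _ _ (by decide),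
        pv_replace_nil _ _ (by decide), pv_replace_nil _ _ (by decide)]
    rw [pvScan_nil]
  | succ n ih =>
    intro s hlen
    cases s with
    | nil =>
      unfold pvChain
      rw [pv_replace_nil _ _ (by decide), pv_replace_nil _ _ (by decide),
          pv_replace_nil _ _ (by decide), pv_replace_nil _ _ (by decide),
          pv_replace_nil _ _ (by decide), pv_replace_nil _ _ (by decide)]
      rw [pvScan_nil]
    | cons c t =>
      by_cases h2 : pvP2 <+: (c :: t)
      · -- '</script>' matches at the front
        obtain ⟨u, hu⟩ := h2
        rw [← hu]
        have hulen : u.length ≤ n := by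
          have hl := congrArg List.length hu
          rw [List.length_append, (by decide : (pvP2).length = 9)] at hl
          simp only [List.length_cons] at hl hlen
          omega
        have c1 : PySem.Chars.replace (pvP2 ++ u) pvP1 pvE1 = pvP2 ++ PySem.Chars.replace u pvP1 pvE1 :=
          pv_replace_append_pat _ _ _ (by decide) (by decide) (pv_ball_ne _ _ (by decide)) u
            (pv_not_prefix_of_mismatch pvP1 pvP2 1 (by decide) (by decide) (by decide) u)
        have c2 : ∀ Y, PySem.Chars.replace (pvP2 ++ Y) pvP2 pvE2 = pvE2 ++ PySem.Chars.replace Y pvP2 pvE2 :=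
          fun Y => pv_replace_append_self _ _ _ (by decide)
        have c3 : ∀ Y, PySem.Chars.replace (pvE2 ++ Y) pvP3 pvE3 = pvE2 ++ PySem.Chars.replace Y pvP3 pvE3 :=
          fun Y => pv_replace_append_no_lt _ _ (by decide) _ (pv_ball_ne _ _ (by decide)) Y
        have c4 : ∀ Y, PySem.Chars.replace (pvE2 ++ Y) pvP4 pvE4 = pvE2 ++ PySem.Chars.replace Y pvP4 pvE4 :=
          fun Y => pv_replace_append_no_lt _ _ (by decide) _ (pv_ball_ne _ _ (by decide)) Y
        have c5 : ∀ Y, PySem.Chars.replace (pvE2 ++ Y) pvP5 pvE5 = pvE2 ++ PySem.Chars.replace Y pvP5 pvE5 :=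
          fun Y => pv_replace_append_no_lt _ _ (by decide) _ (pv_ball_ne _ _ (by decide)) Y
        have c6 : ∀ Y, PySem.Chars.replace (pvE2 ++ Y) pvP6 pvE6 = pvE2 ++ PySem.Chars.replace Y pvP6 pvE6 :=
          fun Y => pv_replace_append_no_lt _ _ (by decide) _ (pv_ball_ne _ _ (by decide)) Y
        have hchain : pvChain (pvP2 ++ u) = pvE2 ++ pvChain u := by
          unfold pvChain
          rw [c1, c2, c3, c4, c5, c6]
        have hm : pvMatch pvPats (pvP2 ++ u) = some (pvE2, 9) := by
          simp only [pvPats, pvMatch]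
          rw [if_pos (by rw [List.isPrefixOf_iff_prefix]; exact ⟨u, rfl⟩)]
          decide
        have hs : pvP2 ++ u = '<' :: ("/script>".toList ++ u) := rfl
        have hscan : pvScan (pvP2 ++ u) = pvE2 ++ pvScan u := by
          rw [hs, pvScan_match '<' _ pvE2 9 rfl (hs ▸ hm)]
          have hdrop : ("/script>".toList ++ u).drop (9 - 1) = u := by
            have h8 : (9 : Nat) - 1 = ("/script>".toList).length := by decide
            rw [h8, List.drop_left]
          rw [hdrop]
        rw [hchain, hscan, ih u hulen]
      by_cases h1 : pvP1 <+: (c :: t)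
      · -- '<script' matches at the front
        obtain ⟨u, hu⟩ := h1
        rw [← hu]
        have hulen : u.length ≤ n := by
          have hl := congrArg List.length hu
          rw [List.length_append, (by decide : (pvP1).length = 7)] at hl
          simp only [List.length_cons] at hl hlen
          omega
        have c1 : ∀ Y, PySem.Chars.replace (pvP1 ++ Y) pvP1 pvE1 = pvE1 ++ PySem.Chars.replace Y pvP1 pvE1 :=
          fun Y => pv_replace_append_self _ _ _ (by decide)
        have c2 : ∀ Y, PySem.Chars.replace (pvE1 ++ Y) pvP2 pvE2 = pvE1 ++ PySem.Chars.replace Y pvP2 pvE2 :=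
          fun Y => pv_replace_append_no_lt _ _ (by decide) _ (pv_ball_ne _ _ (by decide)) Y
        have c3 : ∀ Y, PySem.Chars.replace (pvE1 ++ Y) pvP3 pvE3 = pvE1 ++ PySem.Chars.replace Y pvP3 pvE3 :=
          fun Y => pv_replace_append_no_lt _ _ (by decide) _ (pv_ball_ne _ _ (by decide)) Y
        have c4 : ∀ Y, PySem.Chars.replace (pvE1 ++ Y) pvP4 pvE4 = pvE1 ++ PySem.Chars.replace Y pvP4 pvE4 :=
          fun Y => pv_replace_append_no_lt _ _ (by decide) _ (pv_ball_ne _ _ (by decide)) Y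
        have c5 : ∀ Y, PySem.Chars.replace (pvE1 ++ Y) pvP5 pvE5 = pvE1 ++ PySem.Chars.replace Y pvP5 pvE5 :=
          fun Y => pv_replace_append_no_lt _ _ (by decide) _ (pv_ball_ne _ _ (by decide)) Y
        have c6 : ∀ Y, PySem.Chars.replace (pvE1 ++ Y) pvP6 pvE6 = pvE1 ++ PySem.Chars.replace Y pvP6 pvE6 :=
          fun Y => pv_replace_append_no_lt _ _ (by decide) _ (pv_ball_ne _ _ (by decide)) Y
        have hchain : pvChain (pvP1 ++ u) = pvE1 ++ pvChain u := by
          unfold pvChain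
          rw [c1, c2, c3, c4, c5, c6]
        have hm : pvMatch pvPats (pvP1 ++ u) = some (pvE1, 7) := by
          simp only [pvPats, pvMatch]
          rw [if_neg (by simpa [List.isPrefixOf_iff_prefix] using
                pv_not_prefix_of_mismatch pvP2 pvP1 1 (by decide) (by decide) (by decide) u)]
          rw [if_pos (by rw [List.isPrefixOf_iff_prefix]; exact ⟨u, rfl⟩)]
          decide
        have hs : pvP1 ++ u = '<' :: ("script".toList ++ u) := rfl
        have hscan : pvScan (pvP1 ++ u) = pvE1 ++ pvScan u := by
          rw [hs, pvScan_match '<' _ pvE1 7 rfl (hs ▸ hm)]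
          have hdrop : ("script".toList ++ u).drop (7 - 1) = u := by
            have h6 : (7 : Nat) - 1 = ("script".toList).length := by decide
            rw [h6, List.drop_left]
          rw [hdrop]
        rw [hchain, hscan, ih u hulen]
      by_cases h3 : pvP3 <+: (c :: t)
      · obtain ⟨u, hu⟩ := h3
        rw [← hu]
        have hulen : u.length ≤ n := by
          have hl := congrArg List.length hu
          rw [List.length_append, (by decide : (pvP3).length = 7)] at hl
          simp only [List.length_cons] at hl hlen
          omega
        have c1 : PySem.Chars.replace (pvP3 ++ u) pvP1 pvE1 = pvP3 ++ PySem.Chars.replace u pvP1 pvE1 :=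
          pv_replace_append_pat _ _ _ (by decide) (by decide) (pv_ball_ne _ _ (by decide)) u
            (pv_not_prefix_of_mismatch pvP1 pvP3 1 (by decide) (by decide) (by decide) u)
        have c2 : ∀ Y, PySem.Chars.replace (pvP3 ++ Y) pvP2 pvE2 = pvP3 ++ PySem.Chars.replace Y pvP2 pvE2 :=
          fun Y => pv_replace_append_pat _ _ _ (by decide) (by decide) (pv_ball_ne _ _ (by decide)) Y
            (pv_not_prefix_of_mismatch pvP2 pvP3 1 (by decide) (by decide) (by decide) Y)
        have c3 : ∀ Y, PySem.Chars.replace (pvP3 ++ Y) pvP3 pvE3 = pvE3 ++ PySem.Chars.replace Y pvP3 pvE3 :=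
          fun Y => pv_replace_append_self _ _ _ (by decide)
        have c4 : ∀ Y, PySem.Chars.replace (pvE3 ++ Y) pvP4 pvE4 = pvE3 ++ PySem.Chars.replace Y pvP4 pvE4 :=
          fun Y => pv_replace_append_no_lt _ _ (by decide) _ (pv_ball_ne _ _ (by decide)) Y
        have c5 : ∀ Y, PySem.Chars.replace (pvE3 ++ Y) pvP5 pvE5 = pvE3 ++ PySem.Chars.replace Y pvP5 pvE5 :=
          fun Y => pv_replace_append_no_lt _ _ (by decide) _ (pv_ball_ne _ _ (by decide)) Y
        have c6 : ∀ Y, PySem.Chars.replace (pvE3 ++ Y) pvP6 pvE6 = pvE3 ++ PySem.Chars.replace Y pvP6 pvE6 :=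
          fun Y => pv_replace_append_no_lt _ _ (by decide) _ (pv_ball_ne _ _ (by decide)) Y
        have hchain : pvChain (pvP3 ++ u) = pvE3 ++ pvChain u := by
          unfold pvChain
          rw [c1, c2, c3, c4, c5, c6]
        have hm : pvMatch pvPats (pvP3 ++ u) = some (pvE3, 7) := by
          simp only [pvPats, pvMatch]
          rw [if_neg (by simpa [List.isPrefixOf_iff_prefix] using
                pv_not_prefix_of_mismatch pvP2 pvP3 1 (by decide) (by decide) (by decide) u)]
          rw [if_neg (by simpa [List.isPrefixOf_iff_prefix] using
                pv_not_prefix_of_mismatch pvP1 pvP3 1 (by decide) (by decide) (by decide) u)]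
          rw [if_pos (by rw [List.isPrefixOf_iff_prefix]; exact ⟨u, rfl⟩)]
          decide
        have hs : pvP3 ++ u = '<' :: ("iframe".toList ++ u) := rfl
        have hscan : pvScan (pvP3 ++ u) = pvE3 ++ pvScan u := by
          rw [hs, pvScan_match '<' _ pvE3 7 rfl (hs ▸ hm)]
          have hdrop : ("iframe".toList ++ u).drop (7 - 1) = u := by
            have h6 : (7 : Nat) - 1 = ("iframe".toList).length := by decide
            rw [h6, List.drop_left]
          rw [hdrop]
        rw [hchain, hscan, ih u hulen]
      by_cases h4 : pvP4 <+: (c :: t)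
      · obtain ⟨u, hu⟩ := h4
        rw [← hu]
        have hulen : u.length ≤ n := by
          have hl := congrArg List.length hu
          rw [List.length_append, (by decide : (pvP4).length = 7)] at hl
          simp only [List.length_cons] at hl hlen
          omega
        have c1 : PySem.Chars.replace (pvP4 ++ u) pvP1 pvE1 = pvP4 ++ PySem.Chars.replace u pvP1 pvE1 :=
          pv_replace_append_pat _ _ _ (by decide) (by decide) (pv_ball_ne _ _ (by decide)) u
            (pv_not_prefix_of_mismatch pvP1 pvP4 1 (by decide) (by decide) (by decide) u)
        have c2 : ∀ Y, PySem.Chars.replace (pvP4 ++ Y) pvP2 pvE2 = pvP4 ++ PySem.Chars.replace Y pvP2 pvE2 :=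
          fun Y => pv_replace_append_pat _ _ _ (by decide) (by decide) (pv_ball_ne _ _ (by decide)) Y
            (pv_not_prefix_of_mismatch pvP2 pvP4 1 (by decide) (by decide) (by decide) Y)
        have c3 : ∀ Y, PySem.Chars.replace (pvP4 ++ Y) pvP3 pvE3 = pvP4 ++ PySem.Chars.replace Y pvP3 pvE3 :=
          fun Y => pv_replace_append_pat _ _ _ (by decide) (by decide) (pv_ball_ne _ _ (by decide)) Y
            (pv_not_prefix_of_mismatch pvP3 pvP4 1 (by decide) (by decide) (by decide) Y)
        have c4 : ∀ Y, PySem.Chars.replace (pvP4 ++ Y) pvP4 pvE4 = pvE4 ++ PySem.Chars.replace Y pvP4 pvE4 :=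
          fun Y => pv_replace_append_self _ _ _ (by decide)
        have c5 : ∀ Y, PySem.Chars.replace (pvE4 ++ Y) pvP5 pvE5 = pvE4 ++ PySem.Chars.replace Y pvP5 pvE5 :=
          fun Y => pv_replace_append_no_lt _ _ (by decide) _ (pv_ball_ne _ _ (by decide)) Y
        have c6 : ∀ Y, PySem.Chars.replace (pvE4 ++ Y) pvP6 pvE6 = pvE4 ++ PySem.Chars.replace Y pvP6 pvE6 :=
          fun Y => pv_replace_append_no_lt _ _ (by decide) _ (pv_ball_ne _ _ (by decide)) Y
        have hchain : pvChain (pvP4 ++ u) = pvE4 ++ pvChain u := by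
          unfold pvChain
          rw [c1, c2, c3, c4, c5, c6]
        have hm : pvMatch pvPats (pvP4 ++ u) = some (pvE4, 7) := by
          simp only [pvPats, pvMatch]
          rw [if_neg (by simpa [List.isPrefixOf_iff_prefix] using
                pv_not_prefix_of_mismatch pvP2 pvP4 1 (by decide) (by decide) (by decide) u)]
          rw [if_neg (by simpa [List.isPrefixOf_iff_prefix] using
                pv_not_prefix_of_mismatch pvP1 pvP4 1 (by decide) (by decide) (by decide) u)]
          rw [if_neg (by simpa [List.isPrefixOf_iff_prefix] using
                pv_not_prefix_of_mismatch pvP3 pvP4 1 (by decide) (by decide) (by decide) u)]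
          rw [if_pos (by rw [List.isPrefixOf_iff_prefix]; exact ⟨u, rfl⟩)]
          decide
        have hs : pvP4 ++ u = '<' :: ("object".toList ++ u) := rfl
        have hscan : pvScan (pvP4 ++ u) = pvE4 ++ pvScan u := by
          rw [hs, pvScan_match '<' _ pvE4 7 rfl (hs ▸ hm)]
          have hdrop : ("object".toList ++ u).drop (7 - 1) = u := by
            have h6 : (7 : Nat) - 1 = ("object".toList).length := by decide
            rw [h6, List.drop_left]
          rw [hdrop]
        rw [hchain, hscan, ih u hulen]
      by_cases h5 : pvP5 <+: (c :: t)
      · obtain ⟨u, hu⟩ := h5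
        rw [← hu]
        have hulen : u.length ≤ n := by
          have hl := congrArg List.length hu
          rw [List.length_append, (by decide : (pvP5).length = 6)] at hl
          simp only [List.length_cons] at hl hlen
          omega
        have c1 : PySem.Chars.replace (pvP5 ++ u) pvP1 pvE1 = pvP5 ++ PySem.Chars.replace u pvP1 pvE1 :=
          pv_replace_append_pat _ _ _ (by decide) (by decide) (pv_ball_ne _ _ (by decide)) u
            (pv_not_prefix_of_mismatch pvP1 pvP5 1 (by decide) (by decide) (by decide) u)
        have c2 : ∀ Y, PySem.Chars.replace (pvP5 ++ Y) pvP2 pvE2 = pvP5 ++ PySem.Chars.replace Y pvP2 pvE2 :=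
          fun Y => pv_replace_append_pat _ _ _ (by decide) (by decide) (pv_ball_ne _ _ (by decide)) Y
            (pv_not_prefix_of_mismatch pvP2 pvP5 1 (by decide) (by decide) (by decide) Y)
        have c3 : ∀ Y, PySem.Chars.replace (pvP5 ++ Y) pvP3 pvE3 = pvP5 ++ PySem.Chars.replace Y pvP3 pvE3 :=
          fun Y => pv_replace_append_pat _ _ _ (by decide) (by decide) (pv_ball_ne _ _ (by decide)) Y
            (pv_not_prefix_of_mismatch pvP3 pvP5 1 (by decide) (by decide) (by decide) Y)
        have c4 : ∀ Y, PySem.Chars.replace (pvP5 ++ Y) pvP4 pvE4 = pvP5 ++ PySem.Chars.replace Y pvP4 pvE4 :=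
          fun Y => pv_replace_append_pat _ _ _ (by decide) (by decide) (pv_ball_ne _ _ (by decide)) Y
            (pv_not_prefix_of_mismatch pvP4 pvP5 1 (by decide) (by decide) (by decide) Y)
        have c5 : ∀ Y, PySem.Chars.replace (pvP5 ++ Y) pvP5 pvE5 = pvE5 ++ PySem.Chars.replace Y pvP5 pvE5 :=
          fun Y => pv_replace_append_self _ _ _ (by decide)
        have c6 : ∀ Y, PySem.Chars.replace (pvE5 ++ Y) pvP6 pvE6 = pvE5 ++ PySem.Chars.replace Y pvP6 pvE6 :=
          fun Y => pv_replace_append_no_lt _ _ (by decide) _ (pv_ball_ne _ _ (by decide)) Y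
        have hchain : pvChain (pvP5 ++ u) = pvE5 ++ pvChain u := by
          unfold pvChain
          rw [c1, c2, c3, c4, c5, c6]
        have hm : pvMatch pvPats (pvP5 ++ u) = some (pvE5, 6) := by
          simp only [pvPats, pvMatch]
          rw [if_neg (by simpa [List.isPrefixOf_iff_prefix] using
                pv_not_prefix_of_mismatch pvP2 pvP5 1 (by decide) (by decide) (by decide) u)]
          rw [if_neg (by simpa [List.isPrefixOf_iff_prefix] using
                pv_not_prefix_of_mismatch pvP1 pvP5 1 (by decide) (by decide) (by decide) u)]
          rw [if_neg (by simpa [List.isPrefixOf_iff_prefix] using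
                pv_not_prefix_of_mismatch pvP3 pvP5 1 (by decide) (by decide) (by decide) u)]
          rw [if_neg (by simpa [List.isPrefixOf_iff_prefix] using
                pv_not_prefix_of_mismatch pvP4 pvP5 1 (by decide) (by decide) (by decide) u)]
          rw [if_pos (by rw [List.isPrefixOf_iff_prefix]; exact ⟨u, rfl⟩)]
          decide
        have hs : pvP5 ++ u = '<' :: ("embed".toList ++ u) := rfl
        have hscan : pvScan (pvP5 ++ u) = pvE5 ++ pvScan u := by
          rw [hs, pvScan_match '<' _ pvE5 6 rfl (hs ▸ hm)]
          have hdrop : ("embed".toList ++ u).drop (6 - 1) = u := by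
            have h5' : (6 : Nat) - 1 = ("embed".toList).length := by decide
            rw [h5', List.drop_left]
          rw [hdrop]
        rw [hchain, hscan, ih u hulen]
      by_cases h6 : pvP6 <+: (c :: t)
      · obtain ⟨u, hu⟩ := h6
        rw [← hu]
        have hulen : u.length ≤ n := by
          have hl := congrArg List.length hu
          rw [List.length_append, (by decide : (pvP6).length = 5)] at hl
          simp only [List.length_cons] at hl hlen
          omega
        have c1 : PySem.Chars.replace (pvP6 ++ u) pvP1 pvE1 = pvP6 ++ PySem.Chars.replace u pvP1 pvE1 :=
          pv_replace_append_pat _ _ _ (by decide) (by decide) (pv_ball_ne _ _ (by decide)) u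
            (pv_not_prefix_of_mismatch pvP1 pvP6 1 (by decide) (by decide) (by decide) u)
        have c2 : ∀ Y, PySem.Chars.replace (pvP6 ++ Y) pvP2 pvE2 = pvP6 ++ PySem.Chars.replace Y pvP2 pvE2 :=
          fun Y => pv_replace_append_pat _ _ _ (by decide) (by decide) (pv_ball_ne _ _ (by decide)) Y
            (pv_not_prefix_of_mismatch pvP2 pvP6 1 (by decide) (by decide) (by decide) Y)
        have c3 : ∀ Y, PySem.Chars.replace (pvP6 ++ Y) pvP3 pvE3 = pvP6 ++ PySem.Chars.replace Y pvP3 pvE3 :=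
          fun Y => pv_replace_append_pat _ _ _ (by decide) (by decide) (pv_ball_ne _ _ (by decide)) Y
            (pv_not_prefix_of_mismatch pvP3 pvP6 1 (by decide) (by decide) (by decide) Y)
        have c4 : ∀ Y, PySem.Chars.replace (pvP6 ++ Y) pvP4 pvE4 = pvP6 ++ PySem.Chars.replace Y pvP4 pvE4 :=
          fun Y => pv_replace_append_pat _ _ _ (by decide) (by decide) (pv_ball_ne _ _ (by decide)) Y
            (pv_not_prefix_of_mismatch pvP4 pvP6 1 (by decide) (by decide) (by decide) Y)
        have c5 : ∀ Y, PySem.Chars.replace (pvP6 ++ Y) pvP5 pvE5 = pvP6 ++ PySem.Chars.replace Y pvP5 pvE5 :=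
          fun Y => pv_replace_append_pat _ _ _ (by decide) (by decide) (pv_ball_ne _ _ (by decide)) Y
            (pv_not_prefix_of_mismatch pvP5 pvP6 1 (by decide) (by decide) (by decide) Y)
        have c6 : ∀ Y, PySem.Chars.replace (pvP6 ++ Y) pvP6 pvE6 = pvE6 ++ PySem.Chars.replace Y pvP6 pvE6 :=
          fun Y => pv_replace_append_self _ _ _ (by decide)
        have hchain : pvChain (pvP6 ++ u) = pvE6 ++ pvChain u := by
          unfold pvChain
          rw [c1, c2, c3, c4, c5, c6]
        have hm : pvMatch pvPats (pvP6 ++ u) = some (pvE6, 5) := by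
          simp only [pvPats, pvMatch]
          rw [if_neg (by simpa [List.isPrefixOf_iff_prefix] using
                pv_not_prefix_of_mismatch pvP2 pvP6 1 (by decide) (by decide) (by decide) u)]
          rw [if_neg (by simpa [List.isPrefixOf_iff_prefix] using
                pv_not_prefix_of_mismatch pvP1 pvP6 1 (by decide) (by decide) (by decide) u)]
          rw [if_neg (by simpa [List.isPrefixOf_iff_prefix] using
                pv_not_prefix_of_mismatch pvP3 pvP6 1 (by decide) (by decide) (by decide) u)]
          rw [if_neg (by simpa [List.isPrefixOf_iff_prefix] using
                pv_not_prefix_of_mismatch pvP4 pvP6 1 (by decide) (by decide) (by decide) u)]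
          rw [if_neg (by simpa [List.isPrefixOf_iff_prefix] using
                pv_not_prefix_of_mismatch pvP5 pvP6 1 (by decide) (by decide) (by decide) u)]
          rw [if_pos (by rw [List.isPrefixOf_iff_prefix]; exact ⟨u, rfl⟩)]
          decide
        have hs : pvP6 ++ u = '<' :: ("form".toList ++ u) := rfl
        have hscan : pvScan (pvP6 ++ u) = pvE6 ++ pvScan u := by
          rw [hs, pvScan_match '<' _ pvE6 5 rfl (hs ▸ hm)]
          have hdrop : ("form".toList ++ u).drop (5 - 1) = u := by
            have h4' : (5 : Nat) - 1 = ("form".toList).length := by decide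
            rw [h4', List.drop_left]
          rw [hdrop]
        rw [hchain, hscan, ih u hulen]
      · -- no pattern matches at the front
        have hlt : t.length ≤ n := by simpa using hlen
        have k1 : ∀ q, (∀ x ∈ q, x ≠ '&') → ¬ q <+: t →
            ¬ q <+: PySem.Chars.replace t pvP1 pvE1 :=
          fun q hq h => pv_not_prefix_replace pvP1 pvE1 (by decide) (by decide) t q hq h
        have k2 : ∀ q, (∀ x ∈ q, x ≠ '&') → ¬ q <+: t →
            ¬ q <+: PySem.Chars.replace (PySem.Chars.replace t pvP1 pvE1) pvP2 pvE2 :=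
          fun q hq h => pv_not_prefix_replace pvP2 pvE2 (by decide) (by decide) _ q hq (k1 q hq h)
        have k3 : ∀ q, (∀ x ∈ q, x ≠ '&') → ¬ q <+: t →
            ¬ q <+: PySem.Chars.replace (PySem.Chars.replace (PySem.Chars.replace t pvP1 pvE1) pvP2 pvE2) pvP3 pvE3 :=
          fun q hq h => pv_not_prefix_replace pvP3 pvE3 (by decide) (by decide) _ q hq (k2 q hq h)
        have k4 : ∀ q, (∀ x ∈ q, x ≠ '&') → ¬ q <+: t →
            ¬ q <+: PySem.Chars.replace (PySem.Chars.replace (PySem.Chars.replace (PySem.Chars.replace t pvP1 pvE1) pvP2 pvE2) pvP3 pvE3) pvP4 pvE4 :=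
          fun q hq h => pv_not_prefix_replace pvP4 pvE4 (by decide) (by decide) _ q hq (k3 q hq h)
        have k5 : ∀ q, (∀ x ∈ q, x ≠ '&') → ¬ q <+: t →
            ¬ q <+: PySem.Chars.replace (PySem.Chars.replace (PySem.Chars.replace (PySem.Chars.replace (PySem.Chars.replace t pvP1 pvE1) pvP2 pvE2) pvP3 pvE3) pvP4 pvE4) pvP5 pvE5 :=
          fun q hq h => pv_not_prefix_replace pvP5 pvE5 (by decide) (by decide) _ q hq (k4 q hq h)
        have hP2c : pvP2 = '<' :: "/script>".toList := rfl
        have s2 : ¬ pvP2 <+: (c :: PySem.Chars.replace t pvP1 pvE1) := by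
          intro hp
          rw [hP2c, List.cons_prefix_cons] at hp
          obtain ⟨hc, hq⟩ := hp
          have hnotQt : ¬ "/script>".toList <+: t := by
            intro hpt
            apply h2
            rw [hP2c, ← hc]
            exact List.cons_prefix_cons.mpr ⟨rfl, hpt⟩
          exact k1 _ (pv_ball_ne _ _ (by decide)) hnotQt hq
        have hP3c : pvP3 = '<' :: "iframe".toList := rfl
        have s3 : ¬ pvP3 <+: (c :: PySem.Chars.replace (PySem.Chars.replace t pvP1 pvE1) pvP2 pvE2) := by
          intro hp
          rw [hP3c, List.cons_prefix_cons] at hp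
          obtain ⟨hc, hq⟩ := hp
          have hnotQt : ¬ "iframe".toList <+: t := by
            intro hpt
            apply h3
            rw [hP3c, ← hc]
            exact List.cons_prefix_cons.mpr ⟨rfl, hpt⟩
          exact k2 _ (pv_ball_ne _ _ (by decide)) hnotQt hq
        have hP4c : pvP4 = '<' :: "object".toList := rfl
        have s4 : ¬ pvP4 <+: (c :: PySem.Chars.replace (PySem.Chars.replace (PySem.Chars.replace t pvP1 pvE1) pvP2 pvE2) pvP3 pvE3) := by
          intro hp
          rw [hP4c, List.cons_prefix_cons] at hp
          obtain ⟨hc, hq⟩ := hp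
          have hnotQt : ¬ "object".toList <+: t := by
            intro hpt
            apply h4
            rw [hP4c, ← hc]
            exact List.cons_prefix_cons.mpr ⟨rfl, hpt⟩
          exact k3 _ (pv_ball_ne _ _ (by decide)) hnotQt hq
        have hP5c : pvP5 = '<' :: "embed".toList := rfl
        have s5 : ¬ pvP5 <+: (c :: PySem.Chars.replace (PySem.Chars.replace (PySem.Chars.replace (PySem.Chars.replace t pvP1 pvE1) pvP2 pvE2) pvP3 pvE3) pvP4 pvE4) := by
          intro hp
          rw [hP5c, List.cons_prefix_cons] at hp
          obtain ⟨hc, hq⟩ := hp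
          have hnotQt : ¬ "embed".toList <+: t := by
            intro hpt
            apply h5
            rw [hP5c, ← hc]
            exact List.cons_prefix_cons.mpr ⟨rfl, hpt⟩
          exact k4 _ (pv_ball_ne _ _ (by decide)) hnotQt hq
        have hP6c : pvP6 = '<' :: "form".toList := rfl
        have s6 : ¬ pvP6 <+: (c :: PySem.Chars.replace (PySem.Chars.replace (PySem.Chars.replace (PySem.Chars.replace (PySem.Chars.replace t pvP1 pvE1) pvP2 pvE2) pvP3 pvE3) pvP4 pvE4) pvP5 pvE5) := by
          intro hp
          rw [hP6c, List.cons_prefix_cons] at hp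
          obtain ⟨hc, hq⟩ := hp
          have hnotQt : ¬ "form".toList <+: t := by
            intro hpt
            apply h6
            rw [hP6c, ← hc]
            exact List.cons_prefix_cons.mpr ⟨rfl, hpt⟩
          exact k5 _ (pv_ball_ne _ _ (by decide)) hnotQt hq
        have hchain : pvChain (c :: t) = c :: pvChain t := by
          unfold pvChain
          rw [pv_replace_cons_neg _ _ _ _ h1, pv_replace_cons_neg _ _ _ _ s2,
              pv_replace_cons_neg _ _ _ _ s3, pv_replace_cons_neg _ _ _ _ s4,
              pv_replace_cons_neg _ _ _ _ s5, pv_replace_cons_neg _ _ _ _ s6]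
        have hscan : pvScan (c :: t) = c :: pvScan t := by
          by_cases hc : c = '<'
          · apply pvScan_cons
            right
            simp only [pvPats, pvMatch]
            rw [if_neg (by simp only [List.isPrefixOf_iff_prefix]; exact h2),
                if_neg (by simp only [List.isPrefixOf_iff_prefix]; exact h1),
                if_neg (by simp only [List.isPrefixOf_iff_prefix]; exact h3),
                if_neg (by simp only [List.isPrefixOf_iff_prefix]; exact h4),
                if_neg (by simp only [List.isPrefixOf_iff_prefix]; exact h5),
                if_neg (by simp only [List.isPrefixOf_iff_prefix]; exact h6)]
          · exact pvScan_cons c t (Or.inl hc)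
        rw [hchain, hscan, ih t hlt]

theorem pv_chain_eq_scan (s : List Char) : pvChain s = pvScan s :=
  pv_chain_eq_scan_aux s.length s le_rfl

-- ===== VERDICT (by name: the statement is the Claim_ definition above) =====
theorem sanitize_text_input_spec : Claim_equal_sanitize_text_input := by
  intro text _
  unfold Spec_sanitize_text_input sanitize_text_input sanitize_text_input_alt
  by_cases h : text = ""
  · rw [if_pos h, if_pos h]
  · rw [if_neg h, if_neg h]
    simp only [List.foldl]
    apply String.ext
    rw [PySem.Str.toList_strip, PySem.Str.toList_strip]
    have e3 : ("&lt;" ++ PySem.Str.slice "<iframe" (some 1) none) = "&lt;iframe" := by decide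
    have e4 : ("&lt;" ++ PySem.Str.slice "<object" (some 1) none) = "&lt;object" := by decide
    have e5 : ("&lt;" ++ PySem.Str.slice "<embed" (some 1) none) = "&lt;embed" := by decide
    have e6 : ("&lt;" ++ PySem.Str.slice "<form" (some 1) none) = "&lt;form" := by decide
    rw [e3, e4, e5, e6]
    rw [PySem.Str.toList_replace, PySem.Str.toList_replace, PySem.Str.toList_replace,
        PySem.Str.toList_replace, PySem.Str.toList_replace, PySem.Str.toList_replace]
    have hmk : (String.ofList (pvScan text.toList)).toList = pvScan text.toList := String.toList_ofList
    rw [hmk]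
    exact congrArg PySem.Chars.strip (pv_chain_eq_scan text.toList)
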